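-- pv_equiv track=rewrite | github.com/Ceciliaaayang/database | prj2/Search.py | standardization
-- ===== SOURCE A (Python) =====
-- def standardization(querys):
--
--     a = querys.split()
--     space_querys = ' '
--     for i in a:
--         space_querys = space_querys + i + ' '
--     space_querys = space_querys.strip()
--     final_querys = remove_useless_space(space_querys)
--     return final_querys
--
-- def remove_useless_space(space_querys):
--     l = len(space_querys)
--     IS_FIRST = 1
--     query_list = []
--     last = None
--     for i in range(0, l):
--         if (space_querys[i] == ' '):
--             if ((space_querys[i-1].isalnum() or space_querys[i-1] == '%') and space_querys[i + 1].isalnum()or space_querys[i-1] == '%'):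
--
--                 if(IS_FIRST == 1):# if it's first query
--                     query_list.append(space_querys[:i].replace(' ',''))
--                     IS_FIRST = 0
--                     last = i
--                 else:
--                     query_list.append(space_querys[last:i].replace(' ',''))
--                     last = i
--     query_list.append(space_querys[last:].replace(' ',''))
--     return query_list
-- ===== SOURCE B (Python) =====
-- def standardization(querys):
--     toks = querys.split()
--     if not toks:
--         return ['']
--     groups = []
--     cur = toks[0]
--     for t in toks[1:]:
--         p, n = cur[-1], t[0]
--         if ((p.isalnum() or p == '%') and n.isalnum()) or p == '%':
--             groups.append(cur)
--             cur = t
--         else: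
--             cur += t
--     groups.append(cur)
--     return groups
-- ===== Notes on version B (the rewrite author's own statement) =====
-- stated objective: faster
-- what changed: A rebuilds the query as a space-joined string and scans it character by character, slicing between boundary spaces and deleting spaces with replace; B never builds that string: it folds once over the token list from split(), merging or flushing the current group at each token boundary.
import Mathlib
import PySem

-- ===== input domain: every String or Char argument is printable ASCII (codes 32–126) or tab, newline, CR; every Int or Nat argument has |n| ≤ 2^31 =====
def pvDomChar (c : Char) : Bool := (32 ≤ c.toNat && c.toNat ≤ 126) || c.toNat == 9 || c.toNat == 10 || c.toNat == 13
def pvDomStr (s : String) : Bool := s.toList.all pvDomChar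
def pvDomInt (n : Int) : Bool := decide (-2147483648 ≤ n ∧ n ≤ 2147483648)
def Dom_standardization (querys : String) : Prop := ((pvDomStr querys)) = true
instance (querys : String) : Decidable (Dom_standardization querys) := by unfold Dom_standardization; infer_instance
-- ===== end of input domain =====

-- B replaces A's char-index scan over a rebuilt space-joined string (slices + replace) by one fold over the token
-- list from split(), merging or flushing the current group at each token boundary (measured faster in a timing run).

-- ===== PORT A =====
-- loop body of A's remove_useless_space; state = (IS_FIRST, query_list, last).
-- pyGetD defaults are unreachable: i ranges over range(0, len(s)), s[i-1] wraps (Python negative index),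
-- and s[i+1] is only read when s[i] == ' ', which after strip() never happens at the last index.
def stepA (s : List Char) (st : Int × List (List Char) × Option Int) (i : Int) :
    Int × List (List Char) × Option Int :=
  if PySem.List.pyGetD s i ' ' == ' ' then
    if ((PySem.Chars.isalnum (PySem.List.pyGetD s (i-1) ' ') || PySem.List.pyGetD s (i-1) ' ' == '%')
          && PySem.Chars.isalnum (PySem.List.pyGetD s (i+1) ' '))
        || PySem.List.pyGetD s (i-1) ' ' == '%' then
      if st.1 == 1 then
        (0, st.2.1 ++ [PySem.Chars.replace (PySem.List.slice s none (some i)) [' '] []], some i)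
      else
        -- st.2.2.getD 0: Python uses the int stored in `last`; in this branch `last` is always some _.
        (st.1, st.2.1 ++ [PySem.Chars.replace (PySem.List.slice s (some (st.2.2.getD 0)) (some i)) [' '] []],
          some i)
    else st
  else st

def removeUselessSpace (s : List Char) : List (List Char) :=
  let st := (PySem.List.pyRange 0 (s.length : Int) 1).foldl (stepA s) (1, [], none)
  st.2.1 ++ [PySem.Chars.replace (PySem.List.slice s st.2.2 none) [' '] []]

def standardization (querys : String) : List String :=
  let a := PySem.Chars.split₀ querys.toList
  let space_querys := a.foldl (fun sq i => sq ++ i ++ [' ']) [' ']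
  (removeUselessSpace (PySem.Chars.strip space_querys)).map String.ofList

-- ===== PORT B =====
-- one pass over the tokens: flush the current group at a splitting boundary, else concatenate.
def stdGroups (cur : List Char) (toks : List (List Char)) : List (List Char) :=
  match toks with
  | [] => [cur]
  | t :: rest =>
    let p := PySem.List.pyGetD cur (-1) ' '
    let n := PySem.List.pyGetD t 0 ' '
    if ((PySem.Chars.isalnum p || p == '%') && PySem.Chars.isalnum n) || p == '%' then
      cur :: stdGroups t rest
    else
      stdGroups (cur ++ t) rest

def standardization_alt (querys : String) : List String :=
  match PySem.Chars.split₀ querys.toList with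
  | [] => [""]
  | t :: rest => (stdGroups t rest).map String.ofList

-- ===== PRECONDITION & SPEC =====
def Spec_standardization (querys : String) (out : List String) : Prop := out = standardization_alt querys
instance (querys : String) (out : List String) : Decidable (Spec_standardization querys out) := by
  unfold Spec_standardization; infer_instance

-- ===== CLAIM (what is proved, stated in full; the proofs are below) =====
def Claim_equal_standardization : Prop :=
  ∀ (querys : String), Dom_standardization querys → Spec_standardization querys (standardization querys)

-- ===== LEMMAS AND PROOFS =====

/-- a word produced by split(): nonempty, no whitespace characters. -/
def GoodTok (w : List Char) : Prop := w ≠ [] ∧ ∀ c ∈ w, PySem.Chars.isspace c = false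

/-- the tail of a space-joined token list: each token preceded by one space. -/
def Jtail (ts : List (List Char)) : List Char := ts.flatMap (fun t => ' ' :: t)

/-- tokens joined by single spaces. -/
def Jall : List (List Char) → List Char
  | [] => []
  | t :: rest => t ++ Jtail rest

theorem Jtail_cons (t : List Char) (r : List (List Char)) :
    Jtail (t :: r) = ' ' :: Jall (t :: r) := by
  simp [Jtail, Jall]

theorem Jall_append_singleton (gs : List (List Char)) (t : List Char) (h : gs ≠ []) :
    Jall (gs ++ [t]) = Jall gs ++ ' ' :: t := by
  cases gs with
  | nil => exact absurd rfl h
  | cons g gr => simp [Jall, Jtail, List.flatMap_append]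

theorem split₀_go_good : ∀ (s cur : List Char) (acc : List (List Char)),
    (∀ c ∈ cur, PySem.Chars.isspace c = false) → (∀ w ∈ acc, GoodTok w) →
    ∀ w ∈ PySem.Chars.split₀.go s cur acc, GoodTok w := by
  intro s
  induction s with
  | nil =>
    intro cur acc hcur hacc w hw
    simp only [PySem.Chars.split₀.go] at hw
    have hrev : GoodTok cur.reverse → True := fun _ => trivial
    by_cases hc : cur.isEmpty
    · simp only [hc, if_pos, List.mem_reverse] at hw
      exact hacc w hw
    · simp only [hc, Bool.false_eq_true, if_neg, not_false_iff, List.reverse_cons,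
        List.mem_append, List.mem_reverse, List.mem_singleton] at hw
      rcases hw with hw | hw
      · exact hacc w hw
      · subst hw
        refine ⟨by simpa [List.isEmpty_iff] using hc, ?_⟩
        intro c hcmem; exact hcur c (List.mem_reverse.mp hcmem)
  | cons c rest ih =>
    intro cur acc hcur hacc w hw
    simp only [PySem.Chars.split₀.go] at hw
    by_cases hsp : PySem.Chars.isspace c
    · by_cases hc : cur.isEmpty
      · simp only [hsp, hc, if_pos] at hw
        exact ih [] acc (by simp) hacc w hw
      · simp only [hsp, hc, if_pos, Bool.false_eq_true, if_neg, not_false_iff] at hw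
        refine ih [] (cur.reverse :: acc) (by simp) ?_ w hw
        intro v hv
        rcases List.mem_cons.mp hv with hv | hv
        · subst hv
          refine ⟨by simpa [List.isEmpty_iff] using hc, ?_⟩
          intro d hd; exact hcur d (List.mem_reverse.mp hd)
        · exact hacc v hv
    · simp only [hsp, Bool.false_eq_true, if_neg, not_false_iff] at hw
      refine ih (c :: cur) acc ?_ hacc w hw
      intro d hd
      rcases List.mem_cons.mp hd with hd | hd
      · subst hd; simpa using hsp
      · exact hcur d hd

theorem split₀_good (cs : List Char) : ∀ w ∈ PySem.Chars.split₀ cs, GoodTok w := by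
  have := split₀_go_good cs [] [] (by simp) (by simp)
  simpa [PySem.Chars.split₀] using this

theorem replace_go_space : ∀ (w : List Char) (fuel : Nat) (acc : List Char), w.length ≤ fuel →
    PySem.Chars.replace.go [' '] [] fuel w acc = acc.reverse ++ w.filter (fun c => !(c == ' ')) := by
  intro w
  induction w with
  | nil =>
    intro fuel acc _
    cases fuel <;> simp [PySem.Chars.replace.go]
  | cons c t ih =>
    intro fuel acc hle
    cases fuel with
    | zero => simp at hle
    | succ m =>
      simp only [PySem.Chars.replace.go]
      by_cases hc : c = ' '
      · subst hc
        have hpre : ([' '] : List Char).isPrefixOf (' ' :: t) = true := by simp [List.isPrefixOf]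
        rw [if_pos hpre]
        simp only [List.length_cons, List.length_nil, Nat.zero_add, List.drop_succ_cons,
          List.drop_zero, List.reverse_nil, List.nil_append]
        rw [ih m acc (by simpa using hle)]
        simp
      · have hpre : ([' '] : List Char).isPrefixOf (c :: t) = false := by
          simp [List.isPrefixOf]; exact fun h => hc h.symm
        rw [if_neg (by simp [hpre])]
        rw [ih m (c :: acc) (by simpa using Nat.le_of_succ_le_succ hle)]
        simp [hc]

theorem replace_space (w : List Char) :
    PySem.Chars.replace w [' '] [] = w.filter (fun c => !(c == ' ')) := by
  have h : ([' '] : List Char).isEmpty = false := by decide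
  simp only [PySem.Chars.replace, h]
  simpa using replace_go_space w w.length [] le_rfl

theorem filter_of_nonspace (t : List Char) (h : ∀ c ∈ t, PySem.Chars.isspace c = false) :
    t.filter (fun c => !(c == ' ')) = t := by
  apply List.filter_eq_self.mpr
  intro c hc
  have : c ≠ ' ' := by
    intro hce; subst hce; have := h _ hc; simp [PySem.Chars.isspace] at this
  simpa using this

theorem Jtail_filter : ∀ (ts : List (List Char)), (∀ w ∈ ts, GoodTok w) →
    (Jtail ts).filter (fun c => !(c == ' ')) = ts.flatten := by
  intro ts
  induction ts with
  | nil => intro _; simp [Jtail]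
  | cons t r ih =>
    intro hgood
    have ht := hgood t (by simp)
    have ih' := ih (fun w hw => hgood w (List.mem_cons_of_mem _ hw))
    simp only [Jtail, List.flatMap_cons] at ih' ⊢
    rw [show (' ' :: t) ++ List.flatMap (fun t => ' ' :: t) r
        = ' ' :: (t ++ List.flatMap (fun t => ' ' :: t) r) from rfl]
    rw [List.filter_cons_of_neg (by decide), List.filter_append, filter_of_nonspace t ht.2, ih']
    simp

theorem Jall_filter (ts : List (List Char)) (h : ∀ w ∈ ts, GoodTok w) :
    (Jall ts).filter (fun c => !(c == ' ')) = ts.flatten := by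
  cases ts with
  | nil => simp [Jall]
  | cons t r =>
    simp only [Jall, List.filter_append]
    rw [filter_of_nonspace t (h t (by simp)).2, Jtail_filter r (fun w hw => h w (by simp [hw]))]
    simp

theorem Jall_ne_nil (ts : List (List Char)) (hne : ts ≠ []) (h : ∀ w ∈ ts, GoodTok w) :
    Jall ts ≠ [] := by
  cases ts with
  | nil => exact absurd rfl hne
  | cons t r =>
    have htne := (h t (by simp)).1
    simp only [Jall]
    intro he
    have hl := congrArg List.length he
    simp at hl
    exact htne hl.1

theorem flatten_ne_nil (ts : List (List Char)) (hne : ts ≠ []) (h : ∀ w ∈ ts, GoodTok w) :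
    ts.flatten ≠ [] := by
  cases ts with
  | nil => exact absurd rfl hne
  | cons t r =>
    have htne := (h t (by simp)).1
    simp only [List.flatten_cons]
    intro he
    have hl := congrArg List.length he
    simp at hl
    exact htne hl.1

theorem Jall_getLast? : ∀ (ts : List (List Char)), ts ≠ [] → (∀ w ∈ ts, GoodTok w) →
    (Jall ts).getLast? = ts.flatten.getLast? := by
  intro ts
  induction ts with
  | nil => intro h; exact absurd rfl h
  | cons t r ih =>
    intro _ hgood
    cases r with
    | nil => simp [Jall, Jtail]
    | cons t' r' =>
      have hr : (t' :: r') ≠ [] := by simp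
      have hgr : ∀ w ∈ t' :: r', GoodTok w := fun w hw => hgood w (List.mem_cons_of_mem _ hw)
      have hJne : Jall (t' :: r') ≠ [] := Jall_ne_nil _ hr hgr
      have hfne : (t' :: r').flatten ≠ [] := flatten_ne_nil _ hr hgr
      calc (Jall (t :: t' :: r')).getLast?
          = (t ++ ([' '] ++ Jall (t' :: r'))).getLast? := by
            rw [show Jall (t :: t' :: r') = t ++ Jtail (t' :: r') from rfl, Jtail_cons]; rfl
        _ = (Jall (t' :: r')).getLast? := by
            rw [List.getLast?_append_of_ne_nil t (by simp : ([' '] ++ Jall (t' :: r')) ≠ []),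
              List.getLast?_append_of_ne_nil [' '] hJne]
        _ = (t' :: r').flatten.getLast? := ih hr hgr
        _ = ((t :: t' :: r').flatten).getLast? := by
            rw [show (t :: t' :: r').flatten = t ++ (t' :: r').flatten from rfl,
              List.getLast?_append_of_ne_nil t hfne]

theorem Jall_last_nonspace (ts : List (List Char)) (hne : ts ≠ []) (h : ∀ w ∈ ts, GoodTok w)
    (c : Char) (hc : (Jall ts).getLast? = some c) : PySem.Chars.isspace c = false := by
  rw [Jall_getLast? ts hne h] at hc
  have hmem : c ∈ ts.flatten := List.mem_of_getLast? hc
  rcases List.mem_flatten.mp hmem with ⟨w, hw, hcw⟩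
  exact (h w hw).2 c hcw

theorem build_eq : ∀ (ts : List (List Char)) (init : List Char),
    List.foldl (fun sq i => sq ++ i ++ [' ']) init ts = init ++ ts.flatMap (fun t => t ++ [' ']) := by
  intro ts
  induction ts with
  | nil => intro init; simp
  | cons t r ih => intro init; rw [List.foldl_cons, ih]; simp

theorem flat_eq : ∀ (ts : List (List Char)),
    [' '] ++ ts.flatMap (fun t => t ++ [' ']) = Jtail ts ++ [' '] := by
  intro ts
  induction ts with
  | nil => simp [Jtail]
  | cons t r ih =>
    simp only [Jtail, List.flatMap_cons] at *
    simp only [List.cons_append]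
    rw [show t ++ [' '] ++ List.flatMap (fun t => t ++ [' ']) r
        = t ++ ([' '] ++ List.flatMap (fun t => t ++ [' ']) r) by simp, ih]
    simp

theorem rstrip_of_last (x : List Char)
    (h : ∀ c, x.getLast? = some c → PySem.Chars.isspace c = false) :
    PySem.Chars.rstrip (x ++ [' ']) = x := by
  simp only [PySem.Chars.rstrip, List.reverse_append]
  have h1 : ([' '] : List Char).reverse = [' '] := rfl
  rw [h1]
  simp only [List.singleton_append, List.dropWhile_cons]
  rw [if_pos (by decide)]
  cases hx : x.reverse with
  | nil =>
    have : x = [] := by simpa using congrArg List.reverse hx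
    simp [this]
  | cons c cr =>
    have hc : x.getLast? = some c := by
      rw [← List.head?_reverse, hx]; rfl
    rw [List.dropWhile_cons, if_neg (by simp [h c hc])]
    rw [← hx, List.reverse_reverse]

theorem strip_build (ts : List (List Char)) (h : ∀ w ∈ ts, GoodTok w) :
    PySem.Chars.strip (Jtail ts ++ [' ']) = Jall ts := by
  cases ts with
  | nil => simp only [Jtail, Jall, List.flatMap_nil, List.nil_append]; decide
  | cons t r =>
    rw [Jtail_cons]
    simp only [PySem.Chars.strip, List.cons_append]
    have htne := (h t (by simp)).1
    obtain ⟨a, t', ht⟩ := List.exists_cons_of_ne_nil htne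
    have hspa : PySem.Chars.isspace a = false := (h t (by simp)).2 a (by simp [ht])
    have hJ : Jall (t :: r) ++ [' '] = a :: (t' ++ Jtail r ++ [' ']) := by
      simp [Jall, ht]
    have hlstrip : PySem.Chars.lstrip (' ' :: (Jall (t :: r) ++ [' '])) = Jall (t :: r) ++ [' '] := by
      simp only [PySem.Chars.lstrip, List.dropWhile_cons]
      rw [if_pos (by decide), hJ, List.dropWhile_cons, if_neg (by simp [hspa]), ← hJ]
    rw [hlstrip]
    exact rstrip_of_last _ (Jall_last_nonspace (t :: r) (by simp) h)

-- index facts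
theorem pg_at_len (u v : List Char) (c : Char) (d : Char) :
    PySem.List.pyGetD (u ++ c :: v) (u.length : Int) d = c := by
  rw [PySem.List.pyGetD_natCast]
  simp [List.getD_eq_getElem?_getD]

theorem pg_at_len_add_one (u : List Char) (c a : Char) (t' : List Char) (d : Char) :
    PySem.List.pyGetD (u ++ c :: a :: t') ((u.length : Int) + 1) d = a := by
  have h : ((u.length : Int) + 1) = ((u.length + 1 : Nat) : Int) := by push_cast; ring
  rw [h, PySem.List.pyGetD_natCast]
  simp [List.getD_eq_getElem?_getD]

theorem pg_last (u v : List Char) (d : Char) (h : u ≠ []) :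
    PySem.List.pyGetD (u ++ v) ((u.length : Int) - 1) d = u.getLast h := by
  have h1 : 1 ≤ u.length := List.length_pos_of_ne_nil h
  have h2 : ((u.length : Int) - 1) = ((u.length - 1 : Nat) : Int) := by omega
  rw [h2, PySem.List.pyGetD_natCast]
  rw [List.getD_eq_getElem?_getD, List.getElem?_append_left (by omega : u.length - 1 < u.length)]
  rw [List.getLast_eq_getElem]
  simp [List.getElem?_eq_getElem (by omega : u.length - 1 < u.length)]

theorem pg_mid_mem (u b v : List Char) (i : Int) (h1 : (u.length : Int) ≤ i)
    (h2 : i < (u.length : Int) + (b.length : Int)) :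
    PySem.List.pyGetD (u ++ b ++ v) i ' ' ∈ b := by
  have h0 : 0 ≤ i := le_trans (by positivity) h1
  have hub : u.length ≤ i.toNat := by omega
  have hib : i.toNat - u.length < b.length := by omega
  rw [show i = ((i.toNat : Nat) : Int) by omega, PySem.List.pyGetD_natCast,
    List.getD_eq_getElem?_getD]
  rw [show u ++ b ++ v = u ++ (b ++ v) by simp]
  rw [List.getElem?_append_right hub]
  rw [List.getElem?_append_left hib]
  simp only [List.getElem?_eq_getElem hib, Option.getD_some]
  exact List.getElem_mem _

theorem skip_block (s u b v : List Char) (st : Int × List (List Char) × Option Int)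
    (hs : s = u ++ b ++ v) (hb : ∀ c ∈ b, PySem.Chars.isspace c = false) :
    List.foldl (stepA s) st (PySem.List.pyRange (u.length : Int) ((u.length : Int) + (b.length : Int)) 1)
      = st := by
  rw [PySem.List.foldl_congr_mem (g := fun acc _ => acc)]
  · exact PySem.List.foldl_ignore _ _
  · intro acc i hi
    have hmem := (PySem.List.mem_pyRange_one).mp hi
    have hcb : PySem.List.pyGetD s i ' ' ∈ b := by
      rw [hs]; exact pg_mid_mem u b v i hmem.1 hmem.2
    have hne : PySem.List.pyGetD s i ' ' ≠ ' ' := by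
      intro he
      have hsp := hb _ hcb
      rw [he] at hsp
      simp [PySem.Chars.isspace] at hsp
    simp [stepA, hne]

def finalA (s : List Char) (st : Int × List (List Char) × Option Int) : List (List Char) :=
  st.2.1 ++ [PySem.Chars.replace (PySem.List.slice s st.2.2 none) [' '] []]

theorem main_loop : ∀ (rest gs : List (List Char)) (c : List Char) (ql : List (List Char))
    (isF : Int) (last : Option Int),
    (∀ w ∈ rest, GoodTok w) → (∀ w ∈ gs, GoodTok w) → gs ≠ [] →
    ((isF = 1 ∧ last = none ∧ c = []) ∨
      (isF ≠ 1 ∧ c.getLast? = some ' ' ∧ last = some ((c.length : Int) - 1))) →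
    finalA (c ++ Jall gs ++ Jtail rest)
        (List.foldl (stepA (c ++ Jall gs ++ Jtail rest)) (isF, ql, last)
          (PySem.List.pyRange (((c ++ Jall gs).length : Nat) : Int)
            (((c ++ Jall gs ++ Jtail rest).length : Nat) : Int) 1))
      = ql ++ stdGroups gs.flatten rest := by
  intro rest
  induction rest with
  | nil =>
    intro gs c ql isF last _ hgs hgsne hinv
    have hJt : Jtail ([] : List (List Char)) = [] := by simp [Jtail]
    rw [hJt, List.append_nil]
    rw [show PySem.List.pyRange (((c ++ Jall gs).length : Nat) : Int)
        (((c ++ Jall gs).length : Nat) : Int) 1 = [] by simp [pysem]]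
    rw [List.foldl_nil]
    rcases hinv with ⟨_, h2, h3⟩ | ⟨_, h2, h3⟩
    · subst h2; subst h3
      simp only [finalA, List.nil_append, PySem.List.slice_none_none]
      rw [replace_space, Jall_filter gs hgs]
      simp [stdGroups]
    · subst h3
      obtain ⟨cs, hcs⟩ := List.getLast?_eq_some_iff.mp h2
      subst hcs
      simp only [finalA]
      have h0 : (0:Int) ≤ (((cs ++ [' ']).length : Nat) : Int) - 1 := by simp
      rw [PySem.List.slice_from _ h0]
      have htn : ((((cs ++ [' ']).length : Nat) : Int) - 1).toNat = cs.length := by simp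
      rw [htn]
      rw [show (cs ++ [' ']) ++ Jall gs = cs ++ ([' '] ++ Jall gs) by simp, List.drop_left]
      rw [replace_space]
      rw [show ([' '] ++ Jall gs) = ' ' :: Jall gs from rfl, List.filter_cons_of_neg (by decide)]
      rw [Jall_filter gs hgs]
      simp [stdGroups]
  | cons t rest' ih =>
    intro gs c ql isF last hrest hgs hgsne hinv
    have hgt : GoodTok t := hrest t (by simp)
    obtain ⟨a, t2, hta⟩ := List.exists_cons_of_ne_nil hgt.1
    have hrest' : ∀ w ∈ rest', GoodTok w := fun w hw => hrest w (List.mem_cons_of_mem _ hw)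
    have hJne : Jall gs ≠ [] := Jall_ne_nil gs hgsne hgs
    have hfl : gs.flatten ≠ [] := flatten_ne_nil gs hgsne hgs
    have hune : c ++ Jall gs ≠ [] := by
      intro h
      have hl := congrArg List.length h
      simp at hl
      exact hJne hl.2
    have hs : c ++ Jall gs ++ Jtail (t :: rest')
        = (c ++ Jall gs) ++ ' ' :: (t ++ Jtail rest') := by
      simp [Jtail, List.flatMap_cons]
    rw [hs]
    -- character facts at the boundary
    have hpA : PySem.List.pyGetD ((c ++ Jall gs) ++ ' ' :: (t ++ Jtail rest'))
        (((c ++ Jall gs).length : Nat) : Int) ' ' = ' ' := pg_at_len _ _ _ _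
    have hpprev : PySem.List.pyGetD ((c ++ Jall gs) ++ ' ' :: (t ++ Jtail rest'))
        ((((c ++ Jall gs).length : Nat) : Int) - 1) ' ' = (c ++ Jall gs).getLast hune :=
      pg_last _ _ _ hune
    have hpnext : PySem.List.pyGetD ((c ++ Jall gs) ++ ' ' :: (t ++ Jtail rest'))
        ((((c ++ Jall gs).length : Nat) : Int) + 1) ' ' = a := by
      rw [show (c ++ Jall gs) ++ ' ' :: (t ++ Jtail rest')
          = (c ++ Jall gs) ++ ' ' :: a :: (t2 ++ Jtail rest') by rw [hta]; rfl]
      exact pg_at_len_add_one _ _ _ _ _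
    have hlastu : (c ++ Jall gs).getLast hune = gs.flatten.getLast hfl := by
      have e1 : (c ++ Jall gs).getLast? = gs.flatten.getLast? := by
        rw [List.getLast?_append_of_ne_nil c hJne, Jall_getLast? gs hgsne hgs]
      rw [List.getLast?_eq_some_getLast hune, List.getLast?_eq_some_getLast hfl] at e1
      exact Option.some.inj e1
    -- split the index range: the boundary space, the token t, the remainder
    have hr1 : (((c ++ Jall gs).length : Nat) : Int)
        < (((c ++ Jall gs) ++ ' ' :: (t ++ Jtail rest')).length : Int) := by
      simp
      positivity
    rw [PySem.List.pyRange_one_cons hr1, List.foldl_cons]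
    rw [show (((c ++ Jall gs).length : Nat) : Int) + 1
        = ((((c ++ Jall gs) ++ [' ']).length : Nat) : Int) by simp; ring]
    rw [PySem.List.pyRange_one_append ((((c ++ Jall gs) ++ [' ']).length : Nat) : Int)
        (((((c ++ Jall gs) ++ [' ']).length : Nat) : Int) + (t.length : Int))
        ((((c ++ Jall gs) ++ ' ' :: (t ++ Jtail rest')).length : Nat) : Int)
        (by omega) (by simp; omega), List.foldl_append]
    -- B's one-step unfolding
    have hBp : PySem.List.pyGetD gs.flatten (-1) ' ' = gs.flatten.getLast hfl :=
      PySem.List.pyGetD_neg_one _ _ hfl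
    have hBn : PySem.List.pyGetD t 0 ' ' = a := by rw [hta]; exact PySem.List.pyGetD_zero_cons _ _ _
    by_cases hC : (((PySem.Chars.isalnum (gs.flatten.getLast hfl)
          || gs.flatten.getLast hfl == '%') && PySem.Chars.isalnum a)
        || gs.flatten.getLast hfl == '%') = true
    · -- splitting boundary: flush the group
      have hB : stdGroups gs.flatten (t :: rest') = gs.flatten :: stdGroups t rest' := by
        simp only [stdGroups, hBp, hBn]
        rw [if_pos hC]
      -- the appended slice is the current group with its spaces removed
      have hstep : stepA ((c ++ Jall gs) ++ ' ' :: (t ++ Jtail rest')) (isF, ql, last)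
          (((c ++ Jall gs).length : Nat) : Int)
          = ((if isF == 1 then 0 else isF), ql ++ [gs.flatten],
              some (((c ++ Jall gs).length : Nat) : Int)) := by
        rcases hinv with ⟨h1, h2, h3⟩ | ⟨h1, h2, h3⟩
        · subst h1; subst h2; subst h3
          simp only [stepA, hpA, hpprev, hpnext, hlastu]
          rw [if_pos (by simp), if_pos hC, if_pos (by simp)]
          rw [if_pos (by simp)]
          have hsl : PySem.Chars.replace
              (PySem.List.slice (([] : List Char) ++ Jall gs ++ ' ' :: (t ++ Jtail rest')) none
                (some (((([] : List Char) ++ Jall gs).length : Nat) : Int))) [' '] []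
              = gs.flatten := by
            rw [PySem.List.slice_to _ (by positivity), Int.toNat_natCast, List.take_left]
            rw [replace_space]
            simpa using Jall_filter gs hgs
          rw [hsl]
        · subst h3
          obtain ⟨cs, hcs⟩ := List.getLast?_eq_some_iff.mp h2
          subst hcs
          simp only [stepA, hpA, hpprev, hpnext, hlastu]
          rw [if_pos (by simp), if_pos hC, if_neg (by simp [h1])]
          rw [if_neg (by simp [h1])]
          have hsl : PySem.Chars.replace
              (PySem.List.slice ((cs ++ [' ']) ++ Jall gs ++ ' ' :: (t ++ Jtail rest'))
                (some ((some ((((cs ++ [' ']).length : Nat) : Int) - 1)).getD 0))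
                (some (((((cs ++ [' ']) ++ Jall gs).length : Nat) : Int)))) [' '] []
              = gs.flatten := by
            rw [Option.getD_some]
            rw [PySem.List.slice_toNat _ (by simp) (by positivity)]
            have e1 : (((((cs ++ [' ']).length : Nat) : Int)) - 1).toNat = cs.length := by simp
            have e2 : ((((cs ++ [' ']) ++ Jall gs).length : Nat) : Int).toNat
                = (cs ++ [' ']).length + (Jall gs).length := by simp; omega
            rw [e1, e2]
            rw [show (cs ++ [' ']) ++ Jall gs ++ ' ' :: (t ++ Jtail rest')
                = cs ++ ((' ' :: Jall gs) ++ ' ' :: (t ++ Jtail rest')) by simp]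
            rw [List.drop_left]
            rw [List.take_left' (by simp; omega)]
            rw [replace_space, List.filter_cons_of_neg (by decide), Jall_filter gs hgs]
          rw [hsl]
      rw [hstep]
      -- the token t contains no space: the loop does nothing across it
      have hskip : List.foldl (stepA ((c ++ Jall gs) ++ ' ' :: (t ++ Jtail rest')))
          ((if isF == 1 then 0 else isF), ql ++ [gs.flatten],
            some (((c ++ Jall gs).length : Nat) : Int))
          (PySem.List.pyRange ((((c ++ Jall gs) ++ [' ']).length : Nat) : Int)
            (((((c ++ Jall gs) ++ [' ']).length : Nat) : Int) + (t.length : Int)) 1)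
          = ((if isF == 1 then 0 else isF), ql ++ [gs.flatten],
              some (((c ++ Jall gs).length : Nat) : Int)) :=
        skip_block _ _ _ (Jtail rest') _ (by simp) hgt.2
      rw [hskip]
      -- the induction hypothesis, with the new group [t]
      have mih := ih [t] ((c ++ Jall gs) ++ [' ']) (ql ++ [gs.flatten])
        (if isF == 1 then 0 else isF) (some (((c ++ Jall gs).length : Nat) : Int))
        hrest'
        (by intro w hw; rw [List.mem_singleton] at hw; exact hw ▸ hgt)
        (by simp)
        (Or.inr ⟨by
            rcases hinv with ⟨h1, _, _⟩ | ⟨h1, _, _⟩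
            · subst h1; decide
            · split_ifs with h
              · decide
              · exact h1,
          by simp, by simp; omega⟩)
      rw [show ((c ++ Jall gs) ++ [' ']) ++ Jall [t] ++ Jtail rest'
          = (c ++ Jall gs) ++ ' ' :: (t ++ Jtail rest') by simp [Jall, Jtail]] at mih
      rw [show (((((c ++ Jall gs) ++ [' ']) ++ Jall [t]).length : Nat) : Int)
          = ((((c ++ Jall gs) ++ [' ']).length : Nat) : Int) + (t.length : Int)
          by simp [Jall, Jtail]; ring] at mih
      rw [show ([t] : List (List Char)).flatten = t by simp] at mih
      rw [mih, hB]
      simp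
    · -- non-splitting boundary: the group keeps growing
      have hB : stdGroups gs.flatten (t :: rest') = stdGroups (gs.flatten ++ t) rest' := by
        simp only [stdGroups, hBp, hBn]
        rw [if_neg hC]
      have hstep : stepA ((c ++ Jall gs) ++ ' ' :: (t ++ Jtail rest')) (isF, ql, last)
          (((c ++ Jall gs).length : Nat) : Int) = (isF, ql, last) := by
        simp only [stepA, hpA, hpprev, hpnext, hlastu]
        rw [if_pos (by simp), if_neg hC]
      rw [hstep]
      have hskip : List.foldl (stepA ((c ++ Jall gs) ++ ' ' :: (t ++ Jtail rest')))
          (isF, ql, last)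
          (PySem.List.pyRange ((((c ++ Jall gs) ++ [' ']).length : Nat) : Int)
            (((((c ++ Jall gs) ++ [' ']).length : Nat) : Int) + (t.length : Int)) 1)
          = (isF, ql, last) :=
        skip_block _ _ _ (Jtail rest') _ (by simp) hgt.2
      rw [hskip]
      have hgs' : ∀ w ∈ gs ++ [t], GoodTok w := by
        intro w hw
        rcases List.mem_append.mp hw with hw | hw
        · exact hgs w hw
        · rw [List.mem_singleton] at hw; exact hw ▸ hgt
      have mih := ih (gs ++ [t]) c ql isF last hrest' hgs' (by simp) hinv
      rw [show c ++ Jall (gs ++ [t]) ++ Jtail rest'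
          = (c ++ Jall gs) ++ ' ' :: (t ++ Jtail rest') by
        rw [Jall_append_singleton gs t hgsne]; simp] at mih
      rw [show (((c ++ Jall (gs ++ [t])).length : Nat) : Int)
          = ((((c ++ Jall gs) ++ [' ']).length : Nat) : Int) + (t.length : Int) by
        rw [Jall_append_singleton gs t hgsne]; simp; ring] at mih
      rw [show (gs ++ [t]).flatten = gs.flatten ++ t by simp] at mih
      rw [mih, hB]

theorem standardization_spec : Claim_equal_standardization := by
  unfold Claim_equal_standardization
  intro q _
  unfold Spec_standardization
  simp only [standardization, standardization_alt]
  cases hts : PySem.Chars.split₀ q.toList with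
  | nil =>
    simp only [List.foldl_nil]
    decide
  | cons t rest =>
    have hgood := split₀_good q.toList
    rw [hts] at hgood
    have hgt : GoodTok t := hgood t (by simp)
    have hrest : ∀ w ∈ rest, GoodTok w := fun w hw => hgood w (List.mem_cons_of_mem _ hw)
    rw [build_eq, flat_eq, strip_build _ hgood]
    simp only [removeUselessSpace]
    -- the leading token contains no space: the loop does nothing across it
    have hsplit : PySem.List.pyRange 0 (((Jall (t :: rest)).length : Nat) : Int) 1
        = PySem.List.pyRange 0 ((t.length : Nat) : Int) 1
          ++ PySem.List.pyRange ((t.length : Nat) : Int)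
              (((Jall (t :: rest)).length : Nat) : Int) 1 := by
      apply PySem.List.pyRange_one_append 0 ((t.length : Nat) : Int) _ (by positivity)
      rw [show Jall (t :: rest) = t ++ Jtail rest from rfl]
      push_cast [List.length_append]
      omega
    rw [hsplit, List.foldl_append]
    have hskip : List.foldl (stepA (Jall (t :: rest))) (1, ([] : List (List Char)), (none : Option Int))
        (PySem.List.pyRange 0 ((t.length : Nat) : Int) 1) = (1, [], none) := by
      have h := skip_block (Jall (t :: rest)) [] t (Jtail rest) (1, [], none)
        (by simp [Jall]) hgt.2
      simpa using h
    rw [hskip]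
    have hml := main_loop rest [t] [] [] 1 none hrest
      (by intro w hw; rw [List.mem_singleton] at hw; exact hw ▸ hgt)
      (by simp) (Or.inl ⟨rfl, rfl, rfl⟩)
    rw [show ([] : List Char) ++ Jall [t] ++ Jtail rest = Jall (t :: rest) by
      simp [Jall, Jtail]] at hml
    rw [show (((([] : List Char) ++ Jall [t]).length : Nat) : Int) = ((t.length : Nat) : Int) by
      simp [Jall, Jtail]] at hml
    rw [show ([t] : List (List Char)).flatten = t by simp] at hml
    simp only [finalA] at hml
    rw [hml]
    simp
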